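-- pv_equiv track=rewrite | github.com/jason-j-wang/leetcode-solutions | solutions/3637.py | isTrionic
-- ===== SOURCE A (Python) =====
-- from typing import List
--
-- def isTrionic(nums: List[int]) -> bool:
--     n = len(nums)
--     for i in range(1, n - 2):
--         for j in range(i + 1, n - 1):
--             valid = True
--             for k in range(1, i+1):
--                 if nums[k] <= nums[k-1]:
--                     valid = False
--
--             for k in range(i+1, j+1):
--                 if nums[k] >= nums[k-1]:
--                     valid = False
--
--             for k in range(j+1, n):
--                 if nums[k] <= nums[k-1]:
--                     valid = False
--
--             if valid:
--                 return True
--     return False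
-- ===== SOURCE B (Python) =====
-- from typing import List
--
-- def isTrionic(nums: List[int]) -> bool:
--     n = len(nums)
--     # walk the maximal strictly increasing prefix
--     i = 0
--     while i + 1 < n and nums[i + 1] > nums[i]:
--         i += 1
--     if i < 1 or i > n - 3:
--         return False
--     # walk the maximal strictly decreasing run starting at i
--     j = i
--     while j + 1 < n and nums[j + 1] < nums[j]:
--         j += 1
--     if j == i or j > n - 2:
--         return False
--     # the rest must be one strictly increasing run to the end
--     k = j
--     while k + 1 < n and nums[k + 1] > nums[k]:
--         k += 1
--     return k == n - 1
-- ===== Notes on version B (the rewrite author's own statement) =====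
-- stated objective: faster
-- what changed: Replaced the O(n^3) brute-force search over all split pairs (i,j) with re-validation of every segment by a single O(n) scan that walks the maximal increasing prefix, then the maximal decreasing run, then checks the remainder is one increasing run to the end.
import Mathlib
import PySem

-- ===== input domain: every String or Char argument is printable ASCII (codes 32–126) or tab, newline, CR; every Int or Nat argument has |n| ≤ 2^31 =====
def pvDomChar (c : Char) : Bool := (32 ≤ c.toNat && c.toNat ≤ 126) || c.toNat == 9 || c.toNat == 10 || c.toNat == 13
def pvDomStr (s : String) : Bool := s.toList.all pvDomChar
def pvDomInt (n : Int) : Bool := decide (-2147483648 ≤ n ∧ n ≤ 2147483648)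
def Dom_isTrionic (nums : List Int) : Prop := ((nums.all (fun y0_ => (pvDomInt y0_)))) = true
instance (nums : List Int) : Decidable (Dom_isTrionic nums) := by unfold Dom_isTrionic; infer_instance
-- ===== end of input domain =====

-- B replaces A's O(n^3) brute-force search over split pairs with one O(n) three-run scan (objective: faster).

-- ===== PORT A =====
def isTrionic (nums : List Int) : Bool :=
  let n : Int := nums.length
  (PySem.List.pyRange 1 (n - 2) 1).any (fun i =>
    (PySem.List.pyRange (i + 1) (n - 1) 1).any (fun j =>
      let valid := true
      let valid := (PySem.List.pyRange 1 (i + 1) 1).foldl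
        (fun v k => if PySem.List.pyGetD nums k 0 ≤ PySem.List.pyGetD nums (k - 1) 0 then false else v) valid
      let valid := (PySem.List.pyRange (i + 1) (j + 1) 1).foldl
        (fun v k => if PySem.List.pyGetD nums k 0 ≥ PySem.List.pyGetD nums (k - 1) 0 then false else v) valid
      let valid := (PySem.List.pyRange (j + 1) n 1).foldl
        (fun v k => if PySem.List.pyGetD nums k 0 ≤ PySem.List.pyGetD nums (k - 1) 0 then false else v) valid
      valid))

-- ===== PORT B =====
-- while i + 1 < n and nums[i+1] > nums[i]: i += 1
def walkUp (nums : List Int) (n : Nat) (i : Nat) : Nat :=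
  if h : i + 1 < n ∧ nums.getD i 0 < nums.getD (i + 1) 0 then walkUp nums n (i + 1) else i
termination_by n - i
decreasing_by omega

-- while j + 1 < n and nums[j+1] < nums[j]: j += 1
def walkDown (nums : List Int) (n : Nat) (j : Nat) : Nat :=
  if h : j + 1 < n ∧ nums.getD (j + 1) 0 < nums.getD j 0 then walkDown nums n (j + 1) else j
termination_by n - j
decreasing_by omega

def isTrionic_alt (nums : List Int) : Bool :=
  let n := nums.length
  let i := walkUp nums n 0
  if (i : Int) < 1 ∨ (i : Int) > (n : Int) - 3 then false
  else
    let j := walkDown nums n i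
    if j = i ∨ (j : Int) > (n : Int) - 2 then false
    else
      let k := walkUp nums n j
      decide (k = n - 1)

-- ===== PRECONDITION & SPEC =====
def Spec_isTrionic (nums : List Int) (out : Bool) : Prop := out = isTrionic_alt nums
instance (nums : List Int) (out : Bool) : Decidable (Spec_isTrionic nums out) := by unfold Spec_isTrionic; infer_instance

-- ===== CLAIM (what is proved, stated in full; the proofs are below) =====
def Claim_equal_isTrionic : Prop := ∀ (nums : List Int), Dom_isTrionic nums → Spec_isTrionic nums (isTrionic nums)

-- ===== LEMMAS AND PROOFS =====

-- the common characterisation: a split 0 < a < b < n-1 with strict runs up / down / up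
def TriSpec (nums : List Int) : Prop :=
  ∃ a b : Nat, 1 ≤ a ∧ a + 2 < nums.length ∧ a < b ∧ b + 1 < nums.length ∧
    (∀ m : Nat, m < a → nums.getD m 0 < nums.getD (m + 1) 0) ∧
    (∀ m : Nat, a ≤ m → m < b → nums.getD (m + 1) 0 < nums.getD m 0) ∧
    (∀ m : Nat, b ≤ m → m + 1 < nums.length → nums.getD m 0 < nums.getD (m + 1) 0)

theorem foldl_flag {α : Type} (p : α → Prop) [DecidablePred p] (l : List α) (v : Bool) :
    l.foldl (fun v k => if p k then false else v) v = (v && l.all (fun k => decide ¬ p k)) := by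
  induction l generalizing v with
  | nil => simp
  | cons a t ih =>
    rw [List.foldl_cons, ih]
    by_cases h : p a <;> simp [h]

theorem walkUp_spec (nums : List Int) (n i : Nat) :
    i ≤ walkUp nums n i ∧
    (∀ m, i ≤ m → m < walkUp nums n i → nums.getD m 0 < nums.getD (m + 1) 0) ∧
    ¬ (walkUp nums n i + 1 < n ∧ nums.getD (walkUp nums n i) 0 < nums.getD (walkUp nums n i + 1) 0) ∧
    (i < n → walkUp nums n i < n) := by
  induction i using walkUp.induct (nums := nums) (n := n) with
  | case1 i h ih =>
    rw [walkUp, dif_pos h]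
    obtain ⟨ih1, ih2, ih3, ih4⟩ := ih
    refine ⟨by omega, ?_, ih3, fun _ => ih4 (by omega)⟩
    intro m hm1 hm2
    rcases Nat.eq_or_lt_of_le hm1 with rfl | hlt
    · exact h.2
    · exact ih2 m (by omega) hm2
  | case2 i h =>
    rw [walkUp, dif_neg h]
    exact ⟨le_refl _, fun m h1 h2 => absurd (lt_of_le_of_lt h1 h2) (lt_irrefl _), h, id⟩

theorem walkUp_eq (nums : List Int) (n i m : Nat) (him : i ≤ m) (hm : m < n)
    (hsteps : ∀ k, i ≤ k → k < m → nums.getD k 0 < nums.getD (k + 1) 0)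
    (hmax : ¬ (m + 1 < n ∧ nums.getD m 0 < nums.getD (m + 1) 0)) : walkUp nums n i = m := by
  induction i using walkUp.induct (nums := nums) (n := n) with
  | case1 i h ih =>
    rw [walkUp, dif_pos h]
    rcases Nat.eq_or_lt_of_le him with rfl | hlt
    · exact absurd h hmax
    · exact ih (by omega) (fun k hk1 hk2 => hsteps k (by omega) hk2)
  | case2 i h =>
    rw [walkUp, dif_neg h]
    rcases Nat.eq_or_lt_of_le him with rfl | hlt
    · rfl
    · exact absurd ⟨by omega, hsteps i (le_refl _) hlt⟩ h
theorem walkDown_spec (nums : List Int) (n j : Nat) :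
    j ≤ walkDown nums n j ∧
    (∀ m, j ≤ m → m < walkDown nums n j → nums.getD (m + 1) 0 < nums.getD m 0) ∧
    ¬ (walkDown nums n j + 1 < n ∧ nums.getD (walkDown nums n j + 1) 0 < nums.getD (walkDown nums n j) 0) ∧
    (j < n → walkDown nums n j < n) := by
  induction j using walkDown.induct (nums := nums) (n := n) with
  | case1 j h ih =>
    rw [walkDown, dif_pos h]
    obtain ⟨ih1, ih2, ih3, ih4⟩ := ih
    refine ⟨by omega, ?_, ih3, fun _ => ih4 (by omega)⟩
    intro m hm1 hm2
    rcases Nat.eq_or_lt_of_le hm1 with rfl | hlt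
    · exact h.2
    · exact ih2 m (by omega) hm2
  | case2 j h =>
    rw [walkDown, dif_neg h]
    exact ⟨le_refl _, fun m h1 h2 => absurd (lt_of_le_of_lt h1 h2) (lt_irrefl _), h, id⟩

theorem walkDown_eq (nums : List Int) (n j m : Nat) (him : j ≤ m) (hm : m < n)
    (hsteps : ∀ k, j ≤ k → k < m → nums.getD (k + 1) 0 < nums.getD k 0)
    (hmax : ¬ (m + 1 < n ∧ nums.getD (m + 1) 0 < nums.getD m 0)) : walkDown nums n j = m := by
  induction j using walkDown.induct (nums := nums) (n := n) with
  | case1 j h ih =>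
    rw [walkDown, dif_pos h]
    rcases Nat.eq_or_lt_of_le him with rfl | hlt
    · exact absurd h hmax
    · exact ih (by omega) (fun k hk1 hk2 => hsteps k (by omega) hk2)
  | case2 j h =>
    rw [walkDown, dif_neg h]
    rcases Nat.eq_or_lt_of_le him with rfl | hlt
    · rfl
    · exact absurd ⟨by omega, hsteps j (le_refl _) hlt⟩ h
theorem tri_walk (nums : List Int) (a b : Nat)
    (ha1 : 1 ≤ a) (ha2 : a + 2 < nums.length) (hab : a < b) (hb : b + 1 < nums.length)
    (h1 : ∀ m : Nat, m < a → nums.getD m 0 < nums.getD (m + 1) 0)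
    (h2 : ∀ m : Nat, a ≤ m → m < b → nums.getD (m + 1) 0 < nums.getD m 0)
    (h3 : ∀ m : Nat, b ≤ m → m + 1 < nums.length → nums.getD m 0 < nums.getD (m + 1) 0) :
    walkUp nums nums.length 0 = a ∧ walkDown nums nums.length a = b ∧
    walkUp nums nums.length b = nums.length - 1 := by
  refine ⟨walkUp_eq _ _ _ _ (by omega) (by omega) (fun k _ hk => h1 k hk) ?_,
    walkDown_eq _ _ _ _ (by omega) (by omega) (fun k hk1 hk2 => h2 k hk1 hk2) ?_,
    walkUp_eq _ _ _ _ (by omega) (by omega) (fun k hk1 hk2 => h3 k hk1 (by omega)) ?_⟩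
  · rintro ⟨-, hup⟩
    exact absurd hup (not_lt.2 (le_of_lt (h2 a (le_refl _) hab)))
  · rintro ⟨hlt, hdn⟩
    exact absurd hdn (not_lt.2 (le_of_lt (h3 b (le_refl _) hlt)))
  · rintro ⟨hlt, -⟩
    omega

theorem B_iff (nums : List Int) : isTrionic_alt nums = true ↔ TriSpec nums := by
  simp only [isTrionic_alt]
  split_ifs with hg1 hg2
  · simp only [false_iff]
    rintro ⟨a, b, ha1, ha2, hab, hb, h1, h2, h3⟩
    obtain ⟨e1, -, -⟩ := tri_walk nums a b ha1 ha2 hab hb h1 h2 h3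
    rw [e1] at hg1
    omega
  · simp only [false_iff]
    rintro ⟨a, b, ha1, ha2, hab, hb, h1, h2, h3⟩
    obtain ⟨e1, e2, -⟩ := tri_walk nums a b ha1 ha2 hab hb h1 h2 h3
    rw [e1, e2] at hg2
    rcases hg2 with hg2 | hg2 <;> omega
  · rw [decide_eq_true_iff]
    constructor
    · intro hk
      obtain ⟨hU1, hU2, hU3, hU4⟩ := walkUp_spec nums nums.length 0
      obtain ⟨hD1, hD2, hD3, hD4⟩ := walkDown_spec nums nums.length (walkUp nums nums.length 0)
      obtain ⟨hV1, hV2, hV3, hV4⟩ := walkUp_spec nums nums.length (walkDown nums nums.length (walkUp nums nums.length 0))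
      push Not at hg1 hg2
      refine ⟨walkUp nums nums.length 0, walkDown nums nums.length (walkUp nums nums.length 0),
        by omega, by omega, by omega, by omega, fun m hm => hU2 m (by omega) hm, hD2, ?_⟩
      intro m hm1 hm2
      have := hV2 m hm1
      rw [hk] at this
      exact this (by omega)
    · rintro ⟨a, b, ha1, ha2, hab, hb, h1, h2, h3⟩
      obtain ⟨e1, e2, e3⟩ := tri_walk nums a b ha1 ha2 hab hb h1 h2 h3
      rw [e1, e2, e3]
theorem step_le (nums : List Int) (m : Nat) :
    (¬ PySem.List.pyGetD nums ((m : Int) + 1) 0 ≤ PySem.List.pyGetD nums ((m : Int) + 1 - 1) 0)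
    ↔ nums.getD m 0 < nums.getD (m + 1) 0 := by
  have h1 : ((m : Int) + 1 - 1) = (m : Int) := by ring
  have h2 : ((m : Int) + 1) = ((m + 1 : Nat) : Int) := by push_cast; ring
  rw [h1, h2, PySem.List.pyGetD_natCast, PySem.List.pyGetD_natCast, not_le]

theorem step_ge (nums : List Int) (m : Nat) :
    (¬ PySem.List.pyGetD nums ((m : Int) + 1) 0 ≥ PySem.List.pyGetD nums ((m : Int) + 1 - 1) 0)
    ↔ nums.getD (m + 1) 0 < nums.getD m 0 := by
  have h1 : ((m : Int) + 1 - 1) = (m : Int) := by ring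
  have h2 : ((m : Int) + 1) = ((m + 1 : Nat) : Int) := by push_cast; ring
  rw [h1, h2, PySem.List.pyGetD_natCast, PySem.List.pyGetD_natCast, ge_iff_le, not_le]

set_option maxHeartbeats 1000000 in
theorem A_iff (nums : List Int) : isTrionic nums = true ↔ TriSpec nums := by
  simp only [isTrionic, List.any_eq_true, PySem.List.mem_pyRange_one, foldl_flag, Bool.true_and,
    Bool.and_eq_true, List.all_eq_true, decide_eq_true_eq]
  unfold TriSpec
  constructor
  · rintro ⟨i, ⟨hi1, hi2⟩, j, ⟨hj1, hj2⟩, ⟨h1, h2⟩, h3⟩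
    refine ⟨i.toNat, j.toNat, by omega, by omega, by omega, by omega, ?_, ?_, ?_⟩
    · intro m hm
      exact (step_le nums m).1 (h1 (↑m + 1) ⟨by omega, by omega⟩)
    · intro m hm1 hm2
      exact (step_ge nums m).1 (h2 (↑m + 1) ⟨by omega, by omega⟩)
    · intro m hm1 hm2
      exact (step_le nums m).1 (h3 (↑m + 1) ⟨by omega, by omega⟩)
  · rintro ⟨a, b, ha1, ha2, hab, hb, h1, h2, h3⟩
    refine ⟨(a : Int), ⟨by omega, by omega⟩, (b : Int), ⟨by omega, by omega⟩, ⟨?_, ?_⟩, ?_⟩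
    · rintro k ⟨hk1, hk2⟩
      have hm : k = ((k - 1).toNat : Int) + 1 := by omega
      rw [hm]
      exact (step_le nums _).2 (h1 _ (by omega))
    · rintro k ⟨hk1, hk2⟩
      have hm : k = ((k - 1).toNat : Int) + 1 := by omega
      rw [hm]
      exact (step_ge nums _).2 (h2 _ (by omega) (by omega))
    · rintro k ⟨hk1, hk2⟩
      have hm : k = ((k - 1).toNat : Int) + 1 := by omega
      rw [hm]
      exact (step_le nums _).2 (h3 _ (by omega) (by omega))

-- ===== VERDICT (by name: the statement is the Claim_ definition above) =====
theorem isTrionic_spec : Claim_equal_isTrionic := by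
  intro nums _
  unfold Spec_isTrionic
  have h := (A_iff nums).trans (B_iff nums).symm
  cases hA : isTrionic nums <;> cases hB : isTrionic_alt nums <;> simp_all
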